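-- pv_equiv track=rewrite | github.com/whosmars/Ing-Software-2024-2 | Script2.py | contadorValles
-- ===== SOURCE A (Python) =====
-- def contadorValles(cadena):
--     altura = 0
--     vallesCounter = 0
--     bajo_nivel_mar = False
--     for letra in cadena:
--         if letra == 'U':
--             altura += 1
--         elif letra == 'D':
--             altura -= 1
--             if altura < 0:
--                 bajo_nivel_mar = True
--         if altura >= 0 and bajo_nivel_mar:
--             vallesCounter += 1
--             bajo_nivel_mar = False
--     return vallesCounter
-- ===== SOURCE B (Python) =====
-- def contadorValles(cadena):
--     # Stage 1: reduce the string to +/-1 steps, dropping other characters.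
--     steps = [1 if c == 'U' else -1 for c in cadena if c in ('U', 'D')]
--     # Stage 2: materialize the whole altitude profile (prefix sums).
--     alts = [0]
--     for s in steps:
--         alts.append(alts[-1] + s)
--     # Stage 3: a valley ends exactly where the profile crosses from below 0 to >= 0.
--     return sum(1 for prev, cur in zip(alts, alts[1:]) if prev < 0 <= cur)
-- ===== Notes on version B (the rewrite author's own statement) =====
-- stated objective: alternative
-- what changed: Replaces A's stateful single pass (running altitude + bajo_nivel_mar flag + per-character counter update) by a staged pipeline: map the string to +/-1 steps, materialize the full altitude profile as a prefix-sum list, then count the below-zero-to-nonnegative crossings in that profile with zip/sum.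
import Mathlib
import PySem

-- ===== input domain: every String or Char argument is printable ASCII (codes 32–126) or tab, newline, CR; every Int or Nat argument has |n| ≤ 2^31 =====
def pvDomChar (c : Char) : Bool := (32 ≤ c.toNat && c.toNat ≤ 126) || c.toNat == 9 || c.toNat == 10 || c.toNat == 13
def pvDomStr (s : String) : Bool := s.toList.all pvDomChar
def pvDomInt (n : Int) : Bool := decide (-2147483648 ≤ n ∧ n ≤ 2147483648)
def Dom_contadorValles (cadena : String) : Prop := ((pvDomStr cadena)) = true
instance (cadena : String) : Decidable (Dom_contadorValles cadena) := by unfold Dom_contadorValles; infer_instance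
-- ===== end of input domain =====

-- B replaces A's stateful flag-and-counter pass by a staged pipeline: map to +/-1 steps, build the altitude profile as prefix sums, count below-zero-to-nonnegative crossings (alternative decomposition, same O(n) cost).


-- ===== PORT A =====
-- state: (altura, vallesCounter, bajo_nivel_mar)
def pvStepA (st : Int × Int × Bool) (letra : Char) : Int × Int × Bool :=
  let altura := st.1
  let valles := st.2.1
  let flag := st.2.2
  let (altura, flag) :=
    if letra = 'U' then (altura + 1, flag)
    else if letra = 'D' then (altura - 1, if altura - 1 < 0 then true else flag)
    else (altura, flag)
  if altura ≥ 0 ∧ flag = true then (altura, valles + 1, false) else (altura, valles, flag)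

def contadorValles (cadena : String) : Int :=
  (cadena.toList.foldl pvStepA (0, 0, false)).2.1

-- ===== PORT B =====
-- [1 if c == 'U' else -1 for c in cadena if c in ('U', 'D')]
def pvSteps (l : List Char) : List Int :=
  (l.filter (fun c => c == 'U' || c == 'D')).map (fun c => if c = 'U' then (1 : Int) else -1)

-- alts = [0]; for s in steps: alts.append(alts[-1] + s)
-- alts[-1] ported as getLast?.getD 0 — exact, since alts is never empty
def pvAlts (steps : List Int) : List Int :=
  steps.foldl (fun alts s => alts ++ [(alts.getLast?.getD 0) + s]) [0]

-- sum(1 for prev, cur in zip(alts, alts[1:]) if prev < 0 <= cur); alts[1:] = drop 1 (exact on lists)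
def contadorValles_alt (cadena : String) : Int :=
  let alts := pvAlts (pvSteps cadena.toList)
  ((alts.zip (alts.drop 1)).countP (fun p => decide (p.1 < 0 ∧ 0 ≤ p.2)) : Int)

-- ===== PRECONDITION & SPEC =====
def Spec_contadorValles (cadena : String) (out : Int) : Prop := out = contadorValles_alt cadena
instance (cadena : String) (out : Int) : Decidable (Spec_contadorValles cadena out) := by unfold Spec_contadorValles; infer_instance

-- ===== CLAIM (what is proved, stated in full; the proofs are below) =====
def Claim_equal_contadorValles : Prop := ∀ (cadena : String), Dom_contadorValles cadena → Spec_contadorValles cadena (contadorValles cadena)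

-- ===== LEMMAS AND PROOFS =====

-- reference single-pass machine over the ±1 step list (proof device only)
def pvStepS (st : Int × Int) (s : Int) : Int × Int :=
  (st.1 + s, if s = 1 ∧ st.1 + s = 0 then st.2 + 1 else st.2)

-- A's fold, with the flag coupled to "altura < 0", collapses onto the step list
theorem pvA_to_S (l : List Char) (a v : Int) :
    l.foldl pvStepA (a, v, decide (a < 0)) =
      (((pvSteps l).foldl pvStepS (a, v)).1,
       ((pvSteps l).foldl pvStepS (a, v)).2,
       decide (((pvSteps l).foldl pvStepS (a, v)).1 < 0)) := by
  induction l generalizing a v with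
  | nil => simp [pvSteps]
  | cons c l ih =>
      rcases eq_or_ne c 'U' with hU | hU
      · subst hU
        have hs : pvSteps ('U' :: l) = 1 :: pvSteps l := by
          simp [pvSteps]
        have hstep : pvStepA (a, v, decide (a < 0)) 'U' =
            ((pvStepS (a, v) 1).1, (pvStepS (a, v) 1).2,
              decide ((pvStepS (a, v) 1).1 < 0)) := by
          simp only [pvStepA, pvStepS]
          split_ifs <;> simp_all <;> omega
        rw [hs]
        simp only [List.foldl_cons, hstep]
        exact ih _ _
      · rcases eq_or_ne c 'D' with hD | hD
        · subst hD
          have hs : pvSteps ('D' :: l) = -1 :: pvSteps l := by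
            simp [pvSteps]
          have hstep : pvStepA (a, v, decide (a < 0)) 'D' =
              ((pvStepS (a, v) (-1)).1, (pvStepS (a, v) (-1)).2,
                decide ((pvStepS (a, v) (-1)).1 < 0)) := by
            simp only [pvStepA, pvStepS]
            split_ifs <;> simp_all <;> omega
          rw [hs]
          simp only [List.foldl_cons, hstep]
          exact ih _ _
        · have hs : pvSteps (c :: l) = pvSteps l := by
            simp [pvSteps, hU, hD]
          have hstep : pvStepA (a, v, decide (a < 0)) c = (a, v, decide (a < 0)) := by
            simp only [pvStepA, hU, hD]
            split_ifs <;> simp_all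
            omega
          rw [hs]
          simp only [List.foldl_cons, hstep]
          exact ih _ _

-- the foldl-append construction of alts is scanl (generalized)
theorem pvAlts_gen (steps : List Int) (l : List Int) (a : Int) :
    steps.foldl (fun alts s => alts ++ [(alts.getLast?.getD 0) + s]) (l ++ [a]) =
      l ++ List.scanl (· + ·) a steps := by
  induction steps generalizing l a with
  | nil => simp
  | cons s rest ih =>
      simp only [List.foldl_cons, List.scanl_cons]
      have h : (l ++ [a]).getLast?.getD 0 = a := by simp
      rw [h, List.append_assoc]
      simpa using ih (l ++ [a]) (a + s)

-- counting crossings in the scanl profile equals the single-pass machine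
theorem pvScanl_head (f : Int → Int → Int) (b : Int) (l : List Int) :
    ∃ t, List.scanl f b l = b :: t := by
  cases l with
  | nil => exact ⟨[], rfl⟩
  | cons x xs => exact ⟨_, List.scanl_cons ..⟩

theorem pvCount_scanl (steps : List Int) (a v : Int)
    (h : ∀ s ∈ steps, s = 1 ∨ s = -1) :
    ((steps.foldl pvStepS (a, v)).2 : Int) =
      v + (((List.scanl (· + ·) a steps).zip ((List.scanl (· + ·) a steps).drop 1)).countP
            (fun p => decide (p.1 < 0 ∧ 0 ≤ p.2)) : Int) := by
  induction steps generalizing a v with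
  | nil => simp
  | cons s rest ih =>
      have hs := h s (by simp)
      have hrest : ∀ x ∈ rest, x = 1 ∨ x = -1 := fun x hx => h x (by simp [hx])
      obtain ⟨t, ht⟩ := pvScanl_head (· + ·) (a + s) rest
      have hcond : (a < 0 ∧ 0 ≤ a + s) ↔ (s = 1 ∧ a + s = 0) := by
        rcases hs with h1 | h1 <;> subst h1 <;> omega
      have hzip : (List.scanl (· + ·) a (s :: rest)).zip
            ((List.scanl (· + ·) a (s :: rest)).drop 1) =
          (a, a + s) :: ((List.scanl (· + ·) (a + s) rest).zip
            ((List.scanl (· + ·) (a + s) rest).drop 1)) := by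
        simp [List.scanl_cons, ht]
      rw [hzip, List.countP_cons]
      simp only [List.foldl_cons]
      have hstep : pvStepS (a, v) s = (a + s, if s = 1 ∧ a + s = 0 then v + 1 else v) := rfl
      rw [hstep, ih (a + s) _ hrest]
      by_cases hc : s = 1 ∧ a + s = 0
      · rw [if_pos hc, if_pos (decide_eq_true (hcond.mpr hc))]
        push_cast
        ring
      · have hd : ¬(a < 0 ∧ 0 ≤ a + s) := fun hh => hc (hcond.mp hh)
        rw [if_neg hc, if_neg (by simpa using hd)]
        push_cast
        ring

-- ===== VERDICT (by name: the statement is the Claim_ definition above) =====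
theorem pvSteps_pm (l : List Char) : ∀ s ∈ pvSteps l, s = 1 ∨ s = -1 := by
  intro s hs
  simp only [pvSteps, List.mem_map] at hs
  obtain ⟨c, -, hc⟩ := hs
  by_cases h : c = 'U' <;> simp [h] at hc <;> omega

theorem contadorValles_spec : Claim_equal_contadorValles := by
  intro cadena _
  unfold Spec_contadorValles contadorValles contadorValles_alt
  have hA := pvA_to_S cadena.toList 0 0
  rw [show (false : Bool) = decide ((0:Int) < 0) by decide, hA]
  have halts : pvAlts (pvSteps cadena.toList) =
      List.scanl (· + ·) 0 (pvSteps cadena.toList) := by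
    have := pvAlts_gen (pvSteps cadena.toList) [] 0
    simpa [pvAlts] using this
  have hcount := pvCount_scanl (pvSteps cadena.toList) 0 0 (pvSteps_pm cadena.toList)
  simp only [halts]
  simpa using hcount
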